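-- pv_equiv track=rewrite | github.com/cxyfer/OJ | Leetcode/python3/hard/1521_Find a Value of a Mysterious Function Closest to Target.py | closestToTarget
-- ===== SOURCE A (Python) =====
-- from typing import List
--
-- def closestToTarget(nums: List[int], k: int) -> int:
--     st = []
--     ans = float('inf')
--     for x in nums: # 枚舉右端點
--         # 保存以 x 為右端點的所有 AND 結果，注意由於 AND 的性質，這裡的 st2 是遞減的
--         st2 = [x]
--         for y in st:
--             # 保持有序性質以便去重，省去一個 set
--             if y & x != st2[-1]:
--                 st2.append(y & x)
--         # 更新答案
--         for y in st2:
--             ans = min(ans, abs(y - k))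
--         st = st2
--     return ans
-- ===== SOURCE B (Python) =====
-- def closestToTarget(nums, k):
--     ans = float('inf')
--     n = len(nums)
--     for i in range(n):
--         cur = -1
--         for j in range(i, n):
--             cur &= nums[j]
--             ans = min(ans, abs(cur - k))
--     return ans
-- ===== Notes on version B (the rewrite author's own statement) =====
-- stated objective: simpler
-- what changed: Replaces A's incremental deduplicated frontier of distinct AND values per right endpoint with a plain brute force: for each start index recompute the running AND over the rest of the array, taking the min of |cur-k| as we go.
-- outside the precondition, e.g. on closestToTarget([], 0): A returns inf, B returns inf
import Mathlib
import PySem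

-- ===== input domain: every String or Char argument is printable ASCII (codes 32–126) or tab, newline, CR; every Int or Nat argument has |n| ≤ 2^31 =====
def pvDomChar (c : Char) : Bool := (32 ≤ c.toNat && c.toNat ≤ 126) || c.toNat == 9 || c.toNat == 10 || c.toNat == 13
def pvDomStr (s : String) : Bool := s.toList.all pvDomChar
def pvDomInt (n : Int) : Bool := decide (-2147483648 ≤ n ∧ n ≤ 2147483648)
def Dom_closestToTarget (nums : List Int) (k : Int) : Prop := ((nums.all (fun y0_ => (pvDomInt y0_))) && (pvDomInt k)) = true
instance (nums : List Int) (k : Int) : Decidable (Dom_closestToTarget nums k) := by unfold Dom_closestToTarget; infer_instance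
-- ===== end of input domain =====

-- B replaces A's deduplicated frontier of distinct subarray-AND values with a plain
-- brute-force double loop (running AND from each start index); objective: simpler.

-- Python's float('inf') initial accumulator is modelled as Option Int (none = inf);
-- both Pythons return float('inf') (not an int) on the empty list, which Pre_ excludes.

def pvOMin (a : Option Int) (v : Int) : Option Int :=
  some (match a with | none => v | some m => min m v)

-- ===== PORT A =====
-- inner loop "for y in st: if y & x != st2[-1]: st2.append(y & x)" (st2 is never empty, so getLastD 0 = st2[-1])
def pvAInner (x : Int) (st2 : List Int) (y : Int) : List Int :=
  if PySem.Int.band y x ≠ st2.getLastD 0 then st2 ++ [PySem.Int.band y x] else st2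

-- one iteration of "for x in nums": build st2, then fold the answer update over st2
def pvAStep (k : Int) (p : List Int × Option Int) (x : Int) : List Int × Option Int :=
  let st2 := p.1.foldl (pvAInner x) [x]
  (st2, st2.foldl (fun a y => pvOMin a |y - k|) p.2)

def closestToTarget (nums : List Int) (k : Int) : Int :=
  ((nums.foldl (pvAStep k) ([], none)).2).getD 0

-- ===== PORT B =====
-- inner loop "for j in range(i, n): cur &= nums[j]; ans = min(ans, abs(cur - k))" over the suffix starting at i
def pvBInner (k : Int) : Int → List Int → Option Int → Option Int
  | _, [], ans => ans
  | cur, y :: ys, ans => pvBInner k (PySem.Int.band cur y) ys (pvOMin ans |PySem.Int.band cur y - k|)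

-- outer loop "for i in range(n): cur = -1; <inner>"
def pvBOuter (k : Int) : List Int → Option Int → Option Int
  | [], ans => ans
  | x :: xs, ans => pvBOuter k xs (pvBInner k (-1) (x :: xs) ans)

def closestToTarget_alt (nums : List Int) (k : Int) : Int :=
  (pvBOuter k nums none).getD 0

-- ===== PRECONDITION & SPEC =====
-- Pre_ excludes only the empty list, on which both Pythons return float('inf'), which is not an int.
def Pre_closestToTarget (nums : List Int) (k : Int) : Prop := nums ≠ []
instance (nums : List Int) (k : Int) : Decidable (Pre_closestToTarget nums k) := by
  unfold Pre_closestToTarget; infer_instance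

def pvWitness_closestToTarget : List Int × Int := ([5, 3, 9], 6)

def Spec_closestToTarget (nums : List Int) (k : Int) (out : Int) : Prop := out = closestToTarget_alt nums k
instance (nums : List Int) (k : Int) (out : Int) : Decidable (Spec_closestToTarget nums k out) := by
  unfold Spec_closestToTarget; infer_instance

-- ===== CLAIM (what is proved, stated in full; the proofs are below) =====
def Claim_equal_closestToTarget : Prop := ∀ (nums : List Int) (k : Int), Dom_closestToTarget nums k → Pre_closestToTarget nums k → Spec_closestToTarget nums k (closestToTarget nums k)

-- ===== LEMMAS AND PROOFS =====

-- option-min machinery: none plays float('inf')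
def pvOMerge : Option Int → Option Int → Option Int
  | none, b => b
  | some a, none => some a
  | some a, some b => some (min a b)

def pvListMin (l : List Int) : Option Int := l.foldl pvOMin none

-- running AND with seed c (Python: cur = c; for y in l: cur &= y)
def pvAndC (c : Int) (l : List Int) : Int := l.foldl PySem.Int.band c

-- distinct-free spec of A's st: ANDs of subarrays ending at the newest element, rp = reversed prefix
def pvSufAnds : List Int → List Int
  | [] => []
  | x :: r => x :: (pvSufAnds r).map (fun y => PySem.Int.band y x)

-- all subarray-ANDs of (rp.reverse ++ ns) whose right endpoint lies in ns, grouped by right endpoint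
def pvSpecA : List Int → List Int → List Int
  | _, [] => []
  | rp, x :: ns => pvSufAnds (x :: rp) ++ pvSpecA (x :: rp) ns

-- ANDs of nonempty prefixes, carrying c
def pvPrefAnds : Int → List Int → List Int
  | _, [] => []
  | c, y :: ys => PySem.Int.band c y :: pvPrefAnds (PySem.Int.band c y) ys

-- all subarray-ANDs grouped by left endpoint (B's enumeration order)
def pvAllAnds : List Int → List Int
  | [] => []
  | x :: xs => pvPrefAnds (-1) (x :: xs) ++ pvAllAnds xs

lemma pvOMerge_none_right (a : Option Int) : pvOMerge a none = a := by
  cases a <;> rfl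

lemma pvOMin_eq (a : Option Int) (v : Int) : pvOMin a v = pvOMerge a (some v) := by
  cases a <;> rfl

lemma pvOMerge_assoc (a b c : Option Int) :
    pvOMerge (pvOMerge a b) c = pvOMerge a (pvOMerge b c) := by
  cases a <;> cases b <;> cases c <;> simp [pvOMerge, min_assoc]

lemma foldl_pvOMin (l : List Int) : ∀ a, l.foldl pvOMin a = pvOMerge a (pvListMin l) := by
  induction l with
  | nil => intro a; simp [pvListMin, List.foldl, pvOMerge_none_right]
  | cons x xs ih =>
    intro a
    have h1 : (x :: xs).foldl pvOMin a = xs.foldl pvOMin (pvOMin a x) := rfl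
    have h2 : pvListMin (x :: xs) = xs.foldl pvOMin (pvOMin none x) := rfl
    rw [h1, ih, h2, ih, pvOMin_eq, pvOMin_eq, pvOMerge_assoc]
    rfl

lemma pvListMin_cons (x : Int) (l : List Int) :
    pvListMin (x :: l) = pvOMerge (some x) (pvListMin l) := by
  have : pvListMin (x :: l) = l.foldl pvOMin (pvOMin none x) := rfl
  rw [this, foldl_pvOMin]; rfl

lemma foldl_pvOMin_map (g : Int → Int) (l : List Int) :
    ∀ a, l.foldl (fun acc v => pvOMin acc (g v)) a = pvOMerge a (pvListMin (l.map g)) := by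
  induction l with
  | nil => intro a; simp [pvListMin, List.foldl, pvOMerge_none_right]
  | cons x xs ih =>
    intro a
    have h1 : (x :: xs).foldl (fun acc v => pvOMin acc (g v)) a
        = xs.foldl (fun acc v => pvOMin acc (g v)) (pvOMin a (g x)) := rfl
    rw [h1, ih, List.map_cons, pvListMin_cons, pvOMin_eq, pvOMerge_assoc]

lemma pvListMin_append (l1 l2 : List Int) :
    pvListMin (l1 ++ l2) = pvOMerge (pvListMin l1) (pvListMin l2) := by
  have : pvListMin (l1 ++ l2) = l2.foldl pvOMin (pvListMin l1) := by
    simp [pvListMin, List.foldl_append]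
  rw [this, foldl_pvOMin]

lemma pvListMin_spec (l : List Int) :
    (pvListMin l = none ∧ l = []) ∨
    ∃ m, pvListMin l = some m ∧ m ∈ l ∧ ∀ v ∈ l, m ≤ v := by
  induction l with
  | nil => left; exact ⟨rfl, rfl⟩
  | cons x xs ih =>
    right
    rcases ih with ⟨h0, he⟩ | ⟨m, hm, hmem, hle⟩
    · subst he
      exact ⟨x, by simp [pvListMin_cons, h0, pvOMerge], by simp, by simp⟩
    · refine ⟨min x m, ?_, ?_, ?_⟩
      · simp [pvListMin_cons, hm, pvOMerge]
      · rcases le_total x m with h | h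
        · simp [min_eq_left h]
        · simp [min_eq_right h]
          exact Or.inr hmem
      · intro v hv
        rcases List.mem_cons.mp hv with rfl | hv
        · exact min_le_left _ _
        · exact le_trans (min_le_right _ _) (hle v hv)

lemma pvListMin_eq_of_mem_iff (l1 l2 : List Int) (h : ∀ v, v ∈ l1 ↔ v ∈ l2) :
    pvListMin l1 = pvListMin l2 := by
  rcases pvListMin_spec l1 with ⟨h1, he1⟩ | ⟨m1, hm1, hmem1, hle1⟩
  · rcases pvListMin_spec l2 with ⟨h2, _⟩ | ⟨m2, hm2, hmem2, _⟩
    · rw [h1, h2]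
    · exact absurd ((h m2).mpr hmem2) (by simp [he1])
  · rcases pvListMin_spec l2 with ⟨_, he2⟩ | ⟨m2, hm2, hmem2, hle2⟩
    · exact absurd ((h m1).mp hmem1) (by simp [he2])
    · rw [hm1, hm2]
      exact congrArg some (le_antisymm (hle1 m2 ((h m2).mpr hmem2)) (hle2 m1 ((h m1).mp hmem1)))

lemma pvGetLastD_mem (l : List Int) (d : Int) (h : l ≠ []) : l.getLastD d ∈ l := by
  induction l with
  | nil => exact absurd rfl h
  | cons x xs ih =>
    cases xs with
    | nil => simp
    | cons y ys =>
      have : (x :: y :: ys).getLastD d = (y :: ys).getLastD d := rfl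
      rw [this]
      exact List.mem_cons_of_mem x (ih (by simp))

lemma pvAInner_ne_nil (x y : Int) (init : List Int) (h : init ≠ []) : pvAInner x init y ≠ [] := by
  unfold pvAInner
  split
  · simp
  · exact h

lemma mem_pvAInner (x y v : Int) (init : List Int) (h : init ≠ []) :
    v ∈ pvAInner x init y ↔ v ∈ init ∨ v = PySem.Int.band y x := by
  unfold pvAInner
  split
  · simp
  · rename_i hne
    constructor
    · exact Or.inl
    · rintro (hv | rfl)
      · exact hv
      · have heq : PySem.Int.band y x = init.getLastD 0 := by simpa using hne
        rw [heq]
        exact pvGetLastD_mem init 0 h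

lemma mem_foldl_pvAInner (x : Int) (st : List Int) :
    ∀ init, init ≠ [] → ∀ v,
      (v ∈ st.foldl (pvAInner x) init ↔ v ∈ init ∨ ∃ y ∈ st, v = PySem.Int.band y x) := by
  induction st with
  | nil => intro init _ v; simp
  | cons y ys ih =>
    intro init hinit v
    have h1 : (y :: ys).foldl (pvAInner x) init = ys.foldl (pvAInner x) (pvAInner x init y) := rfl
    rw [h1, ih _ (pvAInner_ne_nil x y init hinit) v, mem_pvAInner x y v init hinit]
    constructor
    · rintro ((hv | rfl) | ⟨z, hz, rfl⟩)
      · exact Or.inl hv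
      · exact Or.inr ⟨y, by simp⟩
      · exact Or.inr ⟨z, by simp [hz]⟩
    · rintro (hv | ⟨z, hz, rfl⟩)
      · exact Or.inl (Or.inl hv)
      · rcases List.mem_cons.mp hz with rfl | hz
        · exact Or.inl (Or.inr rfl)
        · exact Or.inr ⟨z, hz, rfl⟩

lemma pvAndC_neg_one (x : Int) : pvAndC (-1) [x] = x := by
  show PySem.Int.band (-1) x = x
  rw [PySem.Int.band_comm]
  exact PySem.Int.band_neg_one x

lemma pvAndC_append_singleton (c x : Int) (l : List Int) :
    pvAndC c (l ++ [x]) = PySem.Int.band (pvAndC c l) x := by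
  simp [pvAndC, List.foldl_append]

lemma mem_pvSufAnds (rp : List Int) (v : Int) :
    v ∈ pvSufAnds rp ↔ ∃ p s, rp = p ++ s ∧ p ≠ [] ∧ v = pvAndC (-1) p.reverse := by
  induction rp generalizing v with
  | nil =>
    simp only [pvSufAnds, List.not_mem_nil, false_iff]
    rintro ⟨p, s, hps, hp, _⟩
    exact hp (List.append_eq_nil_iff.mp hps.symm).1
  | cons x r ih =>
    simp only [pvSufAnds, List.mem_cons, List.mem_map]
    constructor
    · rintro (hvx | ⟨w, hw, hwv⟩)
      · exact ⟨[x], r, rfl, by simp, by simp [hvx, pvAndC_neg_one]⟩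
      · rcases (ih w).mp hw with ⟨p', s, hr, hp', hwp⟩
        refine ⟨x :: p', s, by rw [hr]; simp, by simp, ?_⟩
        rw [← hwv, hwp, List.reverse_cons, pvAndC_append_singleton]
    · rintro ⟨p, s, hps, hp, hv⟩
      cases p with
      | nil => exact absurd rfl hp
      | cons z p' =>
        obtain ⟨rfl, hr⟩ : z = x ∧ r = p' ++ s := by
          constructor
          · simpa using congrArg (fun l => l.headD 0) hps.symm
          · simpa using congrArg List.tail hps
        cases p' with
        | nil => exact Or.inl (by simp [hv, pvAndC_neg_one])
        | cons w p'' =>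
          refine Or.inr ⟨pvAndC (-1) (w :: p'').reverse, (ih _).mpr ⟨w :: p'', s, hr, by simp, rfl⟩, ?_⟩
          rw [hv, show (z :: w :: p'').reverse = (p''.reverse ++ [w]) ++ [z] from by simp,
            pvAndC_append_singleton, pvAndC_append_singleton,
            show (w :: p'').reverse = p''.reverse ++ [w] from by simp, pvAndC_append_singleton]

lemma mem_st2 (x : Int) (rp st : List Int) (h : ∀ v, v ∈ st ↔ v ∈ pvSufAnds rp) (v : Int) :
    v ∈ st.foldl (pvAInner x) [x] ↔ v ∈ pvSufAnds (x :: rp) := by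
  rw [mem_foldl_pvAInner x st [x] (by simp) v]
  simp only [pvSufAnds, List.mem_cons, List.mem_map, List.not_mem_nil, or_false]
  constructor
  · rintro (hvx | ⟨y, hy, hvy⟩)
    · exact Or.inl hvx
    · exact Or.inr ⟨y, (h y).mp hy, hvy.symm⟩
  · rintro (hvx | ⟨y, hy, hvy⟩)
    · exact Or.inl hvx
    · exact Or.inr ⟨y, (h y).mpr hy, hvy.symm⟩

lemma map_mem_iff (f : Int → Int) (l1 l2 : List Int) (h : ∀ v, v ∈ l1 ↔ v ∈ l2) (w : Int) :
    w ∈ l1.map f ↔ w ∈ l2.map f := by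
  simp only [List.mem_map]
  constructor <;> rintro ⟨v, hv, rfl⟩
  · exact ⟨v, (h v).mp hv, rfl⟩
  · exact ⟨v, (h v).mpr hv, rfl⟩

lemma A_loop (k : Int) (ns : List Int) :
    ∀ st ans rp, (∀ v, v ∈ st ↔ v ∈ pvSufAnds rp) →
      (ns.foldl (pvAStep k) (st, ans)).2 =
        pvOMerge ans (pvListMin ((pvSpecA rp ns).map (fun v => |v - k|))) := by
  induction ns with
  | nil =>
    intro st ans rp _
    simp [pvSpecA, pvListMin, pvOMerge_none_right]
  | cons x ns ih =>
    intro st ans rp h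
    have hstep : (x :: ns).foldl (pvAStep k) (st, ans) =
        ns.foldl (pvAStep k) (pvAStep k (st, ans) x) := rfl
    rw [hstep]
    have h2 := mem_st2 x rp st h
    have hA : pvAStep k (st, ans) x =
        (st.foldl (pvAInner x) [x],
         (st.foldl (pvAInner x) [x]).foldl (fun a y => pvOMin a |y - k|) ans) := rfl
    rw [hA, ih _ _ (x :: rp) h2]
    rw [foldl_pvOMin_map (fun v => |v - k|) (st.foldl (pvAInner x) [x]) ans]
    have hmin : pvListMin ((st.foldl (pvAInner x) [x]).map (fun v => |v - k|)) =
        pvListMin ((pvSufAnds (x :: rp)).map (fun v => |v - k|)) :=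
      pvListMin_eq_of_mem_iff _ _ (map_mem_iff _ _ _ h2)
    rw [hmin, pvOMerge_assoc]
    have : pvSpecA rp (x :: ns) = pvSufAnds (x :: rp) ++ pvSpecA (x :: rp) ns := rfl
    rw [this, List.map_append, pvListMin_append]

lemma A_val (nums : List Int) (k : Int) :
    closestToTarget nums k = (pvListMin ((pvSpecA [] nums).map (fun v => |v - k|))).getD 0 := by
  unfold closestToTarget
  rw [A_loop k nums [] none [] (by simp [pvSufAnds])]
  rfl

lemma pvBInner_eq (k : Int) (l : List Int) :
    ∀ cur ans, pvBInner k cur l ans = (pvPrefAnds cur l).foldl (fun a v => pvOMin a |v - k|) ans := by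
  induction l with
  | nil => intro cur ans; rfl
  | cons y ys ih =>
    intro cur ans
    show pvBInner k (PySem.Int.band cur y) ys (pvOMin ans |PySem.Int.band cur y - k|) = _
    rw [ih]
    rfl

lemma pvBOuter_eq (k : Int) (l : List Int) :
    ∀ ans, pvBOuter k l ans = pvOMerge ans (pvListMin ((pvAllAnds l).map (fun v => |v - k|))) := by
  induction l with
  | nil => intro ans; simp [pvBOuter, pvAllAnds, pvListMin, pvOMerge_none_right]
  | cons x xs ih =>
    intro ans
    show pvBOuter k xs (pvBInner k (-1) (x :: xs) ans) = _
    rw [ih, pvBInner_eq, foldl_pvOMin_map (fun v => |v - k|)]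
    have h0 : pvAllAnds (x :: xs) = pvPrefAnds (-1) (x :: xs) ++ pvAllAnds xs := rfl
    rw [h0, List.map_append, pvListMin_append, pvOMerge_assoc]

lemma B_val (nums : List Int) (k : Int) :
    closestToTarget_alt nums k = (pvListMin ((pvAllAnds nums).map (fun v => |v - k|))).getD 0 := by
  unfold closestToTarget_alt
  rw [pvBOuter_eq]
  rfl

lemma mem_pvPrefAnds (l : List Int) :
    ∀ c v, v ∈ pvPrefAnds c l ↔ ∃ t s, l = t ++ s ∧ t ≠ [] ∧ v = pvAndC c t := by
  induction l with
  | nil =>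
    intro c v
    simp only [pvPrefAnds, List.not_mem_nil, false_iff]
    rintro ⟨t, s, hts, ht, _⟩
    exact ht (List.append_eq_nil_iff.mp hts.symm).1
  | cons y ys ih =>
    intro c v
    simp only [pvPrefAnds, List.mem_cons]
    constructor
    · rintro (rfl | hv)
      · exact ⟨[y], ys, rfl, by simp, rfl⟩
      · rcases (ih _ v).mp hv with ⟨t, s, rfl, ht, rfl⟩
        exact ⟨y :: t, s, rfl, by simp, rfl⟩
    · rintro ⟨t, s, hts, ht, rfl⟩
      cases t with
      | nil => exact absurd rfl ht
      | cons z t' =>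
        obtain ⟨rfl, hys⟩ : z = y ∧ ys = t' ++ s := by
          refine ⟨?_, ?_⟩
          · simpa using congrArg (fun l => l.headD 0) hts.symm
          · simpa using congrArg List.tail hts
        cases t' with
        | nil => exact Or.inl rfl
        | cons w t'' =>
          exact Or.inr ((ih _ _).mpr ⟨w :: t'', s, hys, by simp, rfl⟩)

lemma mem_pvAllAnds (l : List Int) (v : Int) :
    v ∈ pvAllAnds l ↔ ∃ a t s, l = a ++ t ++ s ∧ t ≠ [] ∧ v = pvAndC (-1) t := by
  induction l with
  | nil =>
    simp only [pvAllAnds, List.not_mem_nil, false_iff]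
    rintro ⟨a, t, s, hats, ht, _⟩
    exact ht (List.append_eq_nil_iff.mp (List.append_eq_nil_iff.mp hats.symm).1).2
  | cons x xs ih =>
    simp only [pvAllAnds, List.mem_append]
    constructor
    · rintro (hv | hv)
      · rcases (mem_pvPrefAnds _ _ _).mp hv with ⟨t, s, hts, ht, rfl⟩
        exact ⟨[], t, s, by simpa using hts, ht, rfl⟩
      · rcases ih.mp hv with ⟨a, t, s, hats, ht, rfl⟩
        exact ⟨x :: a, t, s, by simp [hats], ht, rfl⟩
    · rintro ⟨a, t, s, hats, ht, rfl⟩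
      cases a with
      | nil =>
        exact Or.inl ((mem_pvPrefAnds _ _ _).mpr ⟨t, s, by simpa using hats, ht, rfl⟩)
      | cons z a' =>
        obtain ⟨rfl, hxs⟩ : z = x ∧ xs = a' ++ t ++ s := by
          refine ⟨?_, ?_⟩
          · simpa using congrArg (fun l => l.headD 0) hats.symm
          · simpa [List.append_assoc] using congrArg List.tail hats
        exact Or.inr (ih.mpr ⟨a', t, s, by simpa [List.append_assoc] using hxs, ht, rfl⟩)

lemma mem_pvSpecA (ns : List Int) :
    ∀ rp v, v ∈ pvSpecA rp ns ↔
      ∃ u s, ns = u ++ s ∧ u ≠ [] ∧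
        ∃ q, q ≠ [] ∧ q <:+ (rp.reverse ++ u) ∧ v = pvAndC (-1) q := by
  induction ns with
  | nil =>
    intro rp v
    simp only [pvSpecA, List.not_mem_nil, false_iff]
    rintro ⟨u, s, hus, hu, _⟩
    exact hu (List.append_eq_nil_iff.mp hus.symm).1
  | cons x ns ih =>
    intro rp v
    simp only [pvSpecA, List.mem_append]
    constructor
    · rintro (hv | hv)
      · rcases (mem_pvSufAnds _ _).mp hv with ⟨p, s, hps, hp, rfl⟩
        refine ⟨[x], ns, rfl, by simp, p.reverse, by simpa using hp, ?_, rfl⟩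
        have : p <+: (x :: rp) := ⟨s, hps.symm⟩
        have := List.reverse_suffix.mpr this
        simpa using this
      · rcases (ih (x :: rp) v).mp hv with ⟨u', s, rfl, hu', q, hq, hsuf, rfl⟩
        refine ⟨x :: u', s, rfl, by simp, q, hq, ?_, rfl⟩
        have : (x :: rp).reverse ++ u' = rp.reverse ++ (x :: u') := by simp
        rwa [this] at hsuf
    · rintro ⟨u, s, hus, hu, q, hq, hsuf, rfl⟩
      cases u with
      | nil => exact absurd rfl hu
      | cons z u' =>
        obtain ⟨rfl, hns⟩ : z = x ∧ ns = u' ++ s := by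
          refine ⟨?_, ?_⟩
          · simpa using congrArg (fun l => l.headD 0) hus.symm
          · simpa using congrArg List.tail hus
        cases u' with
        | nil =>
          left
          apply (mem_pvSufAnds _ _).mpr
          have hsuf' : q.reverse.reverse <:+ (z :: rp).reverse := by
            simpa using hsuf
          have hpre : q.reverse <+: (z :: rp) := List.reverse_suffix.mp hsuf'
          rcases hpre with ⟨s', hs'⟩
          exact ⟨q.reverse, s', hs'.symm, by simpa using hq, by simp⟩
        | cons w u'' =>
          right
          apply (ih (z :: rp) _).mpr
          refine ⟨w :: u'', s, hns, by simp, q, hq, ?_, rfl⟩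
          have : (z :: rp).reverse ++ (w :: u'') = rp.reverse ++ (z :: w :: u'') := by simp
          rw [this]
          exact hsuf

lemma mem_pvSpecA_nil (ns : List Int) (v : Int) :
    v ∈ pvSpecA [] ns ↔ v ∈ pvAllAnds ns := by
  rw [mem_pvSpecA, mem_pvAllAnds]
  simp only [List.reverse_nil, List.nil_append]
  constructor
  · rintro ⟨u, s, rfl, hu, q, hq, ⟨w, rfl⟩, rfl⟩
    exact ⟨w, q, s, by simp, hq, rfl⟩
  · rintro ⟨a, t, s, rfl, ht, rfl⟩
    exact ⟨a ++ t, s, by simp, by simp [ht], t, ht, List.suffix_append a t, rfl⟩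

-- ===== VERDICT (by name: the statement is the Claim_ definition above) =====
theorem closestToTarget_spec : Claim_equal_closestToTarget := by
  intro nums k _ _
  unfold Spec_closestToTarget
  rw [A_val, B_val]
  rw [pvListMin_eq_of_mem_iff _ _ (map_mem_iff _ _ _ (mem_pvSpecA_nil nums))]
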